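-- pv_equiv track=rewrite | github.com/motmi98/Xu-ly-tieng-noi | Test2.py | count_overlapping_lines
-- ===== SOURCE A (Python) =====
-- def count_overlapping_lines(lines, margin, min_length_samples):
--     line_scores = {}
--     for line in lines:
--         line_scores[line] = 0
--
--     for line_1 in lines:
--         for line_2 in lines:
--             lines_overlap_vertically = (
--                 line_2[0] < (line_1[0] + margin)) and (
--                     line_2[1] > (line_1[1] - margin)) and (
--                         abs(line_2[2] - line_1[2]) > min_length_samples)
--
--             lines_overlap_diagonally = (
--                 (line_2[0] - line_2[2]) < (line_1[0] - line_1[2] + margin)) and (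
--                     (line_2[1] - line_2[2]) > (line_1[1] - line_1[2] - margin)) and (
--                         abs(line_2[2] - line_1[2]) > min_length_samples)
--
--             if lines_overlap_vertically or lines_overlap_diagonally:
--                 line_scores[line_1] += 1
--     return line_scores
-- ===== SOURCE B (Python) =====
-- def count_overlapping_lines(lines, margin, min_length_samples):
--     # Dedup first occurrences, count each distinct line once, multiply by multiplicity.
--     seen = []
--     for line in lines:
--         if line not in seen:
--             seen.append(line)
--
--     def hits(line_1):
--         a1, b1, c1 = line_1[0], line_1[1], line_1[2]
--         n = 0
--         for line_2 in lines:
--             a2, b2, c2 = line_2[0], line_2[1], line_2[2]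
--             if abs(c2 - c1) > min_length_samples and (
--                     (a2 < a1 + margin and b2 > b1 - margin)
--                     or (a2 - c2 < a1 - c1 + margin and b2 - c2 > b1 - c1 - margin)):
--                 n += 1
--         return n
--
--     return {line: lines.count(line) * hits(line) for line in seen}
-- ===== Notes on version B (the rewrite author's own statement) =====
-- stated objective: faster
-- what changed: B dedups the lines into their distinct first occurrences, computes the overlap count once per distinct line (testing the shared abs-condition first), and multiplies by the line's multiplicity, instead of A's full n-by-n double loop accumulating into a dict: O(d*n) for d distinct lines instead of O(n^2).
import Mathlib
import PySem

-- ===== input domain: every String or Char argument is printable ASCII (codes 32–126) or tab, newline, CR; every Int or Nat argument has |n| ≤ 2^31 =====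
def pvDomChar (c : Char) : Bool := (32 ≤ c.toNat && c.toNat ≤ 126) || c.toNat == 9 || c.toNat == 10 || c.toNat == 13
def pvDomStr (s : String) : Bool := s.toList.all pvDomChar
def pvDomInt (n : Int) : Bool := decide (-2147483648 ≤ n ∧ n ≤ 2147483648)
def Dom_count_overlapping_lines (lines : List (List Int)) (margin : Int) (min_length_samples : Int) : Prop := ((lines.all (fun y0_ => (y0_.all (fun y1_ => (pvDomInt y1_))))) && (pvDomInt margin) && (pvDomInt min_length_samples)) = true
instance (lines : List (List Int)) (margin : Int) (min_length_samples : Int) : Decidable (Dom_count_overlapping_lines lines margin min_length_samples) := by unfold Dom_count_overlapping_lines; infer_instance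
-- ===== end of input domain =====

-- B dedups the lines first, computes each distinct line's score once and multiplies by its
-- multiplicity: O(d*n) for d distinct lines instead of A's O(n^2) (objective: faster).

-- ===== PORT A =====
def count_overlapping_lines (lines : List (List Int)) (margin : Int) (min_length_samples : Int) : List (List Int × Int) :=
  let line_scores : PySem.Dict (List Int) Int :=
    lines.foldl (fun d line => d.insert line 0) PySem.Dict.empty
  let line_scores :=
    lines.foldl (fun d line_1 =>
      lines.foldl (fun d line_2 =>
        let lines_overlap_vertically :=
          decide (PySem.List.pyGetD line_2 0 0 < PySem.List.pyGetD line_1 0 0 + margin) &&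
          decide (PySem.List.pyGetD line_2 1 0 > PySem.List.pyGetD line_1 1 0 - margin) &&
          decide (|PySem.List.pyGetD line_2 2 0 - PySem.List.pyGetD line_1 2 0| > min_length_samples)
        let lines_overlap_diagonally :=
          decide (PySem.List.pyGetD line_2 0 0 - PySem.List.pyGetD line_2 2 0 <
                  PySem.List.pyGetD line_1 0 0 - PySem.List.pyGetD line_1 2 0 + margin) &&
          decide (PySem.List.pyGetD line_2 1 0 - PySem.List.pyGetD line_2 2 0 >
                  PySem.List.pyGetD line_1 1 0 - PySem.List.pyGetD line_1 2 0 - margin) &&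
          decide (|PySem.List.pyGetD line_2 2 0 - PySem.List.pyGetD line_1 2 0| > min_length_samples)
        if lines_overlap_vertically || lines_overlap_diagonally then
          d.modify line_1 0 (· + 1)
        else d) d) line_scores
  line_scores.items

-- ===== PORT B =====
-- B-side helper: number of lines overlapping line_1 (abs condition tested first, then the two clauses)
def pvHits (lines : List (List Int)) (margin : Int) (min_length_samples : Int) (line_1 : List Int) : Int :=
  let a1 := PySem.List.pyGetD line_1 0 0
  let b1 := PySem.List.pyGetD line_1 1 0
  let c1 := PySem.List.pyGetD line_1 2 0
  lines.foldl (fun n line_2 =>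
    let a2 := PySem.List.pyGetD line_2 0 0
    let b2 := PySem.List.pyGetD line_2 1 0
    let c2 := PySem.List.pyGetD line_2 2 0
    if decide (|c2 - c1| > min_length_samples) &&
        ((decide (a2 < a1 + margin) && decide (b2 > b1 - margin)) ||
         (decide (a2 - c2 < a1 - c1 + margin) && decide (b2 - c2 > b1 - c1 - margin))) then
      n + 1
    else n) 0

def count_overlapping_lines_alt (lines : List (List Int)) (margin : Int) (min_length_samples : Int) : List (List Int × Int) :=
  let seen : PySem.Set (List Int) := PySem.Set.ofList lines
  (seen.foldl
    (fun d line =>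
      d.insert line (PySem.List.count lines line * pvHits lines margin min_length_samples line))
    (PySem.Dict.empty : PySem.Dict (List Int) Int)).items

-- ===== PRECONDITION & SPEC =====
-- Pre_: every line has at least 3 coordinates; otherwise Python A hits an IndexError
-- (each line is compared against itself, and that comparison always reaches an index ≥ len).
def Pre_count_overlapping_lines (lines : List (List Int)) (margin : Int) (min_length_samples : Int) : Prop :=
  ∀ l ∈ lines, 3 ≤ l.length
instance (lines : List (List Int)) (margin : Int) (min_length_samples : Int) : Decidable (Pre_count_overlapping_lines lines margin min_length_samples) := by unfold Pre_count_overlapping_lines; infer_instance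

def pvWitness_count_overlapping_lines : List (List Int) × Int × Int := ([[1, 2, 3], [0, 5, 9], [1, 2, 3]], 1, 0)

def Spec_count_overlapping_lines (lines : List (List Int)) (margin : Int) (min_length_samples : Int) (out : List (List Int × Int)) : Prop := out = count_overlapping_lines_alt lines margin min_length_samples
instance (lines : List (List Int)) (margin : Int) (min_length_samples : Int) (out : List (List Int × Int)) : Decidable (Spec_count_overlapping_lines lines margin min_length_samples out) := by unfold Spec_count_overlapping_lines; infer_instance

-- ===== CLAIM (what is proved, stated in full; the proofs are below) =====
def Claim_equal_count_overlapping_lines : Prop := ∀ (lines : List (List Int)) (margin : Int) (min_length_samples : Int), Dom_count_overlapping_lines lines margin min_length_samples → Pre_count_overlapping_lines lines margin min_length_samples → Spec_count_overlapping_lines lines margin min_length_samples (count_overlapping_lines lines margin min_length_samples)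

-- ===== LEMMAS AND PROOFS =====

-- A's pair predicate, as written in A
def pvPredA (margin : Int) (min_length_samples : Int) (line_1 line_2 : List Int) : Bool :=
  (decide (PySem.List.pyGetD line_2 0 0 < PySem.List.pyGetD line_1 0 0 + margin) &&
   decide (PySem.List.pyGetD line_2 1 0 > PySem.List.pyGetD line_1 1 0 - margin) &&
   decide (|PySem.List.pyGetD line_2 2 0 - PySem.List.pyGetD line_1 2 0| > min_length_samples)) ||
  (decide (PySem.List.pyGetD line_2 0 0 - PySem.List.pyGetD line_2 2 0 <
           PySem.List.pyGetD line_1 0 0 - PySem.List.pyGetD line_1 2 0 + margin) &&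
   decide (PySem.List.pyGetD line_2 1 0 - PySem.List.pyGetD line_2 2 0 >
           PySem.List.pyGetD line_1 1 0 - PySem.List.pyGetD line_1 2 0 - margin) &&
   decide (|PySem.List.pyGetD line_2 2 0 - PySem.List.pyGetD line_1 2 0| > min_length_samples))

theorem pv_bool_regroup (x y z u v : Bool) :
    (z && ((x && y) || (u && v))) = ((x && y && z) || (u && v && z)) := by
  cases x <;> cases y <;> cases z <;> cases u <;> cases v <;> rfl

theorem pv_foldl_count {α : Type} (q : α → Bool) :
    ∀ (xs : List α) (n : Int), xs.foldl (fun n x => if q x then n + 1 else n) n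
      = n + ((xs.countP q : Nat) : Int) := by
  intro xs
  induction xs with
  | nil => intro n; simp
  | cons a xs ih =>
      intro n
      simp only [List.foldl_cons, List.countP_cons, ih]
      by_cases hq : q a <;> simp [hq] <;> push_cast <;> omega

theorem pvHits_eq_countP (lines : List (List Int)) (margin min_length_samples : Int) (k : List Int) :
    pvHits lines margin min_length_samples k
      = ((lines.countP (fun l2 => pvPredA margin min_length_samples k l2) : Nat) : Int) := by
  unfold pvHits
  rw [pv_foldl_count, zero_add]
  congr 1
  apply List.countP_congr
  intro l2 _
  simp only [pvPredA]
  rw [pv_bool_regroup]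

theorem pv_init_getD (xs : List (List Int)) (d : PySem.Dict (List Int) Int) (k : List Int) :
    ((xs.foldl (fun d l => d.insert l 0) d).getD k 0) = if k ∈ xs then 0 else d.getD k 0 := by
  induction xs generalizing d with
  | nil => simp
  | cons a xs ih =>
      simp only [List.foldl_cons, ih, PySem.Dict.getD_insert, List.mem_cons]
      split_ifs with h1 h2 <;> simp_all

theorem pv_inner_getD (lines : List (List Int)) (p : List Int → Bool) (l1 : List Int) :
    ∀ (xs : List (List Int)) (d : PySem.Dict (List Int) Int) (k : List Int),
      ((xs.foldl (fun d l2 => if p l2 then d.modify l1 0 (· + 1) else d) d).getD k 0)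
        = d.getD k 0 + if k = l1 then ((xs.countP p : Nat) : Int) else 0 := by
  intro xs
  induction xs with
  | nil => intro d k; simp
  | cons a xs ih =>
      intro d k
      simp only [List.foldl_cons, List.countP_cons]
      by_cases hp : p a
      · simp only [hp, if_true, ih, PySem.Dict.getD_modify]
        split_ifs with h1 <;> subst_eqs <;> push_cast <;> omega
      · simp only [hp, Bool.false_eq_true, if_false, ih]
        split_ifs <;> push_cast <;> omega

theorem pv_inner_keys (lines : List (List Int)) (p : List Int → Bool) (l1 : List Int) :
    ∀ (xs : List (List Int)) (d : PySem.Dict (List Int) Int), d.contains l1 = true →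
      ((xs.foldl (fun d l2 => if p l2 then d.modify l1 0 (· + 1) else d) d).keys) = d.keys := by
  intro xs
  induction xs with
  | nil => intro d _; simp
  | cons a xs ih =>
      intro d hc
      simp only [List.foldl_cons]
      by_cases hp : p a
      · simp only [hp, if_true]
        rw [ih _ (by rw [PySem.Dict.contains_modify]; simp [hc])]
        rw [PySem.Dict.keys_modify, PySem.Dict.keys_insert_of_contains _ _ hc]
      · simp only [hp, Bool.false_eq_true, if_false]
        exact ih d hc

theorem pv_outer_getD (lines : List (List Int)) (margin min_length_samples : Int) :
    ∀ (xs : List (List Int)) (d : PySem.Dict (List Int) Int) (k : List Int),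
      ((xs.foldl (fun d l1 =>
          lines.foldl (fun d l2 => if pvPredA margin min_length_samples l1 l2 then d.modify l1 0 (· + 1) else d) d) d).getD k 0)
        = d.getD k 0 + (xs.count k : Int) * ((lines.countP (fun l2 => pvPredA margin min_length_samples k l2) : Nat) : Int) := by
  intro xs
  induction xs with
  | nil => intro d k; simp
  | cons l1 xs ih =>
      intro d k
      simp only [List.foldl_cons, ih, pv_inner_getD lines, List.count_cons]
      rcases eq_or_ne k l1 with h | h
      · subst h
        simp only [if_true, BEq.rfl, beq_self_eq_true, if_pos rfl]
        push_cast
        ring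
      · simp only [h, if_false, beq_iff_eq, Ne.symm h, if_neg h]
        simp [Ne.symm h]

theorem pv_outer_keys (lines : List (List Int)) (margin min_length_samples : Int) :
    ∀ (xs : List (List Int)) (d : PySem.Dict (List Int) Int), (∀ l1 ∈ xs, d.contains l1 = true) →
      ((xs.foldl (fun d l1 =>
          lines.foldl (fun d l2 => if pvPredA margin min_length_samples l1 l2 then d.modify l1 0 (· + 1) else d) d) d).keys) = d.keys := by
  intro xs
  induction xs with
  | nil => intro d _; simp
  | cons l1 xs ih =>
      intro d hc
      simp only [List.foldl_cons]
      have hk1 : ((lines.foldl (fun d l2 => if pvPredA margin min_length_samples l1 l2 then d.modify l1 0 (· + 1) else d) d).keys) = d.keys :=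
        pv_inner_keys lines _ l1 lines d (hc l1 (by simp))
      rw [ih _ ?_, hk1]
      intro l1' hl1'
      rw [PySem.Dict.contains_iff_mem_keys, hk1, ← PySem.Dict.contains_iff_mem_keys]
      exact hc l1' (by simp [hl1'])

theorem pv_b_items (lines : List (List Int)) (margin min_length_samples : Int) :
    count_overlapping_lines_alt lines margin min_length_samples
      = (PySem.Set.ofList lines).map
          (fun k => (k, PySem.List.count lines k * pvHits lines margin min_length_samples k)) := by
  unfold count_overlapping_lines_alt
  rw [PySem.Dict.items_foldl_insert_fresh (PySem.Set.ofList lines) (fun a => a)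
      (fun line => PySem.List.count lines line * pvHits lines margin min_length_samples line)
      PySem.Dict.empty (fun a _ => PySem.Dict.contains_empty a)
      (by simpa using PySem.Set.nodup_ofList lines)]
  rfl

-- ===== VERDICT (by name: the statement is the Claim_ definition above) =====
theorem pv_a_phrased (lines : List (List Int)) (margin min_length_samples : Int) :
    count_overlapping_lines lines margin min_length_samples
      = (lines.foldl (fun d l1 =>
          lines.foldl (fun d l2 => if pvPredA margin min_length_samples l1 l2 then d.modify l1 0 (· + 1) else d) d)
          (lines.foldl (fun d l => d.insert l 0) (PySem.Dict.empty : PySem.Dict (List Int) Int))).items := rfl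

theorem count_overlapping_lines_spec : Claim_equal_count_overlapping_lines := by
  intro lines margin min_length_samples _ _
  unfold Spec_count_overlapping_lines
  rw [pv_a_phrased, pv_b_items]
  have hkeys0 : (lines.foldl (fun d l => d.insert l 0) (PySem.Dict.empty : PySem.Dict (List Int) Int)).keys
      = PySem.Set.ofList lines := by
    rw [PySem.Dict.keys_foldl_insert (f := fun _ _ => 0), PySem.Dict.keys_empty, PySem.Set.update_nil_left]
  have hkeys : (lines.foldl (fun d l1 =>
          lines.foldl (fun d l2 => if pvPredA margin min_length_samples l1 l2 then d.modify l1 0 (· + 1) else d) d)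
          (lines.foldl (fun d l => d.insert l 0) (PySem.Dict.empty : PySem.Dict (List Int) Int))).keys
      = PySem.Set.ofList lines := by
    rw [pv_outer_keys lines margin min_length_samples lines _ ?_, hkeys0]
    intro l1 hl1
    rw [PySem.Dict.contains_iff_mem_keys, hkeys0, PySem.Set.mem_ofList]
    exact hl1
  rw [PySem.Dict.items_eq_map_keys _ (by rw [hkeys]; exact PySem.Set.nodup_ofList lines) 0, hkeys]
  apply List.map_congr_left
  intro k hk
  have hkmem : k ∈ lines := (PySem.Set.mem_ofList lines k).1 hk
  rw [pv_outer_getD, pv_init_getD]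
  simp [hkmem, pvHits_eq_countP, PySem.List.count_eq]
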